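-- pv_equiv track=rewrite | github.com/roman-kachanovsky/checkio-python | solutions/github/how_to_find_friends.py | gyahun_dash_solution
-- ===== SOURCE A (Python) =====
-- def gyahun_dash_solution(shakehands, me, you):
--     from itertools import chain
--
--     hands = {tuple(pair.split('-')) for pair in shakehands}
--     amigos = {me}
--
--     while amigos != set():
--         pairs = {pair for pair in hands if any(one in pair for one in amigos)}
--         amigos = set(chain(*pairs)) - amigos
--         if you in amigos: return True
--         hands -= pairs
--
--     return False
-- ===== SOURCE B (Python) =====
-- def gyahun_dash_solution(shakehands, me, you):
--     # Build the adjacency dict once, then do a single DFS from me.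
--     adj = {}
--     for pair in shakehands:
--         parts = pair.split('-')
--         for p in parts:
--             adj.setdefault(p, set()).update(parts)
--     if me == you:
--         return False
--     seen = {me}
--     stack = [me]
--     while stack:
--         node = stack.pop()
--         for nxt in adj.get(node, ()):
--             if nxt not in seen:
--                 seen.add(nxt)
--                 stack.append(nxt)
--     return you in seen
-- ===== Notes on version B (the rewrite author's own statement) =====
-- stated objective: alternative
-- what changed: A repeatedly re-scans and deletes edges from the whole handshake set to expand a frontier level by level; B builds an adjacency dict in one pass and then runs a single stack-based DFS from me, visiting only me's component.
import Mathlib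
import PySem

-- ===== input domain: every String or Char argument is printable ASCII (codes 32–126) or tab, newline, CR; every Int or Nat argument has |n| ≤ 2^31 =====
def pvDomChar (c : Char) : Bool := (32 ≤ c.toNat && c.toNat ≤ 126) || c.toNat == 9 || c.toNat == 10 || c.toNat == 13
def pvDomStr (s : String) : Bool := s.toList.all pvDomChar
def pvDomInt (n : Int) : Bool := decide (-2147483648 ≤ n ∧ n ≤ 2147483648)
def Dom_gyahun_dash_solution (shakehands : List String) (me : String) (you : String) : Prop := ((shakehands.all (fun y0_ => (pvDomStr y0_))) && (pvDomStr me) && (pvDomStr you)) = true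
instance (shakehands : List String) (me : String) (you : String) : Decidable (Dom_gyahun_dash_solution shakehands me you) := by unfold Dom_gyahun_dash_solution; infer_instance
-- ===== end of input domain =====

-- B replaces A's repeated frontier expansion over the shrinking edge set by an adjacency
-- dict built in one pass followed by a single stack-based DFS from me (objective: alternative).

-- pair.split('-'): the separator is the literal "-" ≠ "", so split? is always some and getD never fires
def pvSplit (s : String) : List String := (PySem.Str.split? s "-").getD []

-- ===== PORT A =====
-- the while-loop of A; fuel = |hands| + 1 bounds the number of iterations (hands shrinks or the loop exits)
def pvLoopA (fuel : Nat) (hands : List (List String)) (amigos : List String) (you : String) : Bool :=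
  match fuel with
  | 0 => false
  | fuel + 1 =>
    if amigos = [] then false
    else
      let pairs := hands.filter (fun pair => amigos.any (fun one => pair.contains one))
      let amigos' := PySem.Set.diff (PySem.Set.ofList pairs.flatten) amigos
      if you ∈ amigos' then true
      else pvLoopA fuel (PySem.Set.diff hands pairs) amigos' you

def gyahun_dash_solution (shakehands : List String) (me : String) (you : String) : Bool :=
  let hands := PySem.Set.ofList (shakehands.map (fun pair => pvSplit pair))
  let amigos := PySem.Set.ofList [me]
  pvLoopA (hands.length + 1) hands amigos you

-- ===== PORT B =====
-- adj.setdefault(p, set()).update(parts) for each part p of one handshake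
def pvAdjStep (adj : PySem.Dict String (PySem.Set String)) (pair : String) :
    PySem.Dict String (PySem.Set String) :=
  let parts := pvSplit pair
  parts.foldl (fun d p => d.insert p (PySem.Set.update (d.getD p PySem.Set.empty) parts)) adj

-- the body of the DFS inner loop: if nxt not in seen, mark it and push it
def pvPush (ss : PySem.Set String × List String) (nxt : String) :
    PySem.Set String × List String :=
  if PySem.Set.contains ss.1 nxt then ss else (PySem.Set.add ss.1 nxt, ss.2 ++ [nxt])

-- the DFS while-loop; fuel bounds its iterations (each pops one element, pushes only unseen nodes)
def pvDfs (fuel : Nat) (adj : PySem.Dict String (PySem.Set String))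
    (seen : PySem.Set String) (stack : List String) : PySem.Set String :=
  match fuel, stack with
  | 0, _ => seen
  | _ + 1, [] => seen
  | fuel + 1, h :: t =>
    let node := (h :: t).getLast (List.cons_ne_nil h t)
    let stack' := (h :: t).dropLast
    let ss := (adj.getD node PySem.Set.empty).foldl pvPush (seen, stack')
    pvDfs fuel adj ss.1 ss.2

def gyahun_dash_solution_alt (shakehands : List String) (me : String) (you : String) : Bool :=
  let adj := shakehands.foldl pvAdjStep PySem.Dict.empty
  if me == you then false
  else
    let reached := pvDfs (2 * (shakehands.map (fun pair => pvSplit pair)).flatten.length + 2)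
      adj (PySem.Set.ofList [me]) [me]
    PySem.Set.contains reached you

-- ===== PRECONDITION & SPEC =====
def Spec_gyahun_dash_solution (shakehands : List String) (me : String) (you : String) (out : Bool) : Prop := out = gyahun_dash_solution_alt shakehands me you
instance (shakehands : List String) (me : String) (you : String) (out : Bool) : Decidable (Spec_gyahun_dash_solution shakehands me you out) := by unfold Spec_gyahun_dash_solution; infer_instance

-- ===== CLAIM (what is proved, stated in full; the proofs are below) =====
def Claim_equal_gyahun_dash_solution : Prop := ∀ (shakehands : List String) (me : String) (you : String), Dom_gyahun_dash_solution shakehands me you → Spec_gyahun_dash_solution shakehands me you (gyahun_dash_solution shakehands me you)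

-- ===== LEMMAS AND PROOFS =====

-- x and y lie on a common edge of E, or are joined by a chain of such edges
inductive pvConn : List (List String) → String → String → Prop
  | edge {E : List (List String)} {e : List String} {a b : String} :
      e ∈ E → a ∈ e → b ∈ e → pvConn E a b
  | trans {E : List (List String)} {a b c : String} :
      pvConn E a b → pvConn E b c → pvConn E a c

theorem pvConn_mono {E E' : List (List String)} {a b : String}
    (hsub : ∀ e, e ∈ E → e ∈ E') (h : pvConn E a b) : pvConn E' a b := by
  induction h with
  | edge he ha hb => exact pvConn.edge (hsub _ he) ha hb
  | trans _ _ ih1 ih2 => exact pvConn.trans ih1 ih2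

theorem pvConn_src {E : List (List String)} {a b : String}
    (h : pvConn E a b) : ∃ e ∈ E, a ∈ e := by
  induction h with
  | edge he ha _ => exact ⟨_, he, ha⟩
  | trans _ _ ih1 _ => exact ih1

theorem pvConn_dst {E : List (List String)} {a b : String}
    (h : pvConn E a b) : ∃ e ∈ E, b ∈ e := by
  induction h with
  | edge he _ hb => exact ⟨_, he, hb⟩
  | trans _ _ _ ih2 => exact ih2

-- ---- A side ----

-- the frontier step of pvLoopA
def pvP (hands : List (List String)) (amigos : List String) : List (List String) :=
  hands.filter (fun pair => amigos.any (fun one => pair.contains one))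

def pvF' (hands : List (List String)) (amigos : List String) : List String :=
  PySem.Set.diff (PySem.Set.ofList (pvP hands amigos).flatten) amigos

theorem mem_pvP (hands : List (List String)) (amigos : List String) (e : List String) :
    e ∈ pvP hands amigos ↔ e ∈ hands ∧ ∃ x ∈ amigos, x ∈ e := by
  simp [pvP, List.mem_filter, List.any_eq_true]

theorem mem_pvF' (hands : List (List String)) (amigos : List String) (z : String) :
    z ∈ pvF' hands amigos ↔ (∃ e ∈ pvP hands amigos, z ∈ e) ∧ z ∉ amigos := by
  simp [pvF', PySem.Set.mem_diff, PySem.Set.mem_ofList, List.mem_flatten]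

theorem mem_pvD (hands : List (List String)) (amigos : List String) (e : List String) :
    e ∈ PySem.Set.diff hands (pvP hands amigos) ↔ e ∈ hands ∧ ¬ ∃ x ∈ amigos, x ∈ e := by
  rw [PySem.Set.mem_diff, mem_pvP]
  exact ⟨fun ⟨h1, h2⟩ => ⟨h1, fun hx => h2 ⟨h1, hx⟩⟩,
    fun ⟨h1, h2⟩ => ⟨h1, fun h => h2 h.2⟩⟩

theorem pvLoopA_iff (fuel : Nat) (hands : List (List String)) (amigos : List String)
    (you : String) (hfuel : hands.length < fuel) :
    pvLoopA fuel hands amigos you = true ↔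
      you ∉ amigos ∧ ∃ f ∈ amigos, pvConn hands f you := by
  induction fuel generalizing hands amigos with
  | zero => omega
  | succ fuel ih =>
    by_cases hF : amigos = []
    · subst hF; simp [pvLoopA]
    · have hstep : pvLoopA (fuel + 1) hands amigos you =
          (if you ∈ pvF' hands amigos then true
           else pvLoopA fuel (PySem.Set.diff hands (pvP hands amigos)) (pvF' hands amigos) you) := by
        simp only [pvLoopA, if_neg hF]; rfl
      rw [hstep]
      by_cases hyou : you ∈ pvF' hands amigos
      · rw [if_pos hyou]
        obtain ⟨⟨e, heP, hyoue⟩, hyouF⟩ := (mem_pvF' hands amigos you).1 hyou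
        obtain ⟨heH, x, hxF, hxe⟩ := (mem_pvP hands amigos e).1 heP
        simp only [true_iff]
        exact ⟨hyouF, x, hxF, pvConn.edge heH hxe hyoue⟩
      · rw [if_neg hyou]
        by_cases hP : pvP hands amigos = []
        · have hF'nil : pvF' hands amigos = [] := by
            apply List.eq_nil_iff_forall_not_mem.2
            intro z hz
            obtain ⟨⟨e, heP, _⟩, _⟩ := (mem_pvF' hands amigos z).1 hz
            rw [hP] at heP; exact absurd heP (List.not_mem_nil)
          have hfalse : pvLoopA fuel (PySem.Set.diff hands (pvP hands amigos)) [] you = false := by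
            cases fuel <;> rfl
          rw [hF'nil, hfalse]
          simp only [Bool.false_eq_true, false_iff]
          rintro ⟨_, f, hfF, hconn⟩
          obtain ⟨e, heH, hfe⟩ := pvConn_src hconn
          have : e ∈ pvP hands amigos := (mem_pvP hands amigos e).2 ⟨heH, f, hfF, hfe⟩
          rw [hP] at this; exact absurd this (List.not_mem_nil)
        · have hlen : (PySem.Set.diff hands (pvP hands amigos)).length < hands.length := by
            have hdef : PySem.Set.diff hands (pvP hands amigos) =
                hands.filter (fun x => !(PySem.Set.contains (pvP hands amigos) x)) := rfl
            rw [hdef]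
            apply List.length_filter_lt_length_iff_exists.mpr
            obtain ⟨e, heP⟩ := List.exists_mem_of_ne_nil _ hP
            refine ⟨e, ((mem_pvP hands amigos e).1 heP).1, ?_⟩
            simpa using heP
          rw [ih _ _ (by omega)]
          constructor
          · rintro ⟨_, f', hf'F', hconn'⟩
            obtain ⟨⟨e2, he2P, hf'e2⟩, _⟩ := (mem_pvF' hands amigos f').1 hf'F'
            obtain ⟨he2H, x, hxF, hxe2⟩ := (mem_pvP hands amigos e2).1 he2P
            have hconnH : pvConn hands f' you :=
              pvConn_mono (fun e he => ((mem_pvD hands amigos e).1 he).1) hconn'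
            have hyouF : you ∉ amigos := by
              obtain ⟨e3, he3D, hyoue3⟩ := pvConn_dst hconn'
              intro hyF
              exact ((mem_pvD hands amigos e3).1 he3D).2 ⟨you, hyF, hyoue3⟩
            exact ⟨hyouF, x, hxF, pvConn.trans (pvConn.edge he2H hxe2 hf'e2) hconnH⟩
          · rintro ⟨hyouF, f, hfF, hconn⟩
            have claim : ∀ a b : String, pvConn hands a b → b ∉ amigos →
                (a ∈ amigos ∨ a ∈ pvF' hands amigos ∨
                  ∃ g ∈ pvF' hands amigos, pvConn (PySem.Set.diff hands (pvP hands amigos)) g a) →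
                (b ∈ pvF' hands amigos ∨
                  ∃ g ∈ pvF' hands amigos, pvConn (PySem.Set.diff hands (pvP hands amigos)) g b) := by
              intro a b hab
              induction hab with
              | @edge e a b heH hae hbe =>
                intro hbF hsrc
                rcases hsrc with haF | haF' | ⟨g, hgF', hga⟩
                · left
                  have heP : e ∈ pvP hands amigos := (mem_pvP hands amigos e).2 ⟨heH, a, haF, hae⟩
                  exact (mem_pvF' hands amigos b).2 ⟨⟨e, heP, hbe⟩, hbF⟩
                · by_cases hhit : ∃ x ∈ amigos, x ∈ e
                  · left
                    have heP : e ∈ pvP hands amigos := (mem_pvP hands amigos e).2 ⟨heH, hhit⟩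
                    exact (mem_pvF' hands amigos b).2 ⟨⟨e, heP, hbe⟩, hbF⟩
                  · right
                    exact ⟨a, haF', pvConn.edge ((mem_pvD hands amigos e).2 ⟨heH, hhit⟩) hae hbe⟩
                · by_cases hhit : ∃ x ∈ amigos, x ∈ e
                  · left
                    have heP : e ∈ pvP hands amigos := (mem_pvP hands amigos e).2 ⟨heH, hhit⟩
                    exact (mem_pvF' hands amigos b).2 ⟨⟨e, heP, hbe⟩, hbF⟩
                  · right
                    exact ⟨g, hgF',
                      pvConn.trans hga (pvConn.edge ((mem_pvD hands amigos e).2 ⟨heH, hhit⟩) hae hbe)⟩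
              | @trans a c b h1 h2 ih1 ih2 =>
                intro hbF hsrc
                by_cases hcF : c ∈ amigos
                · exact ih2 hbF (Or.inl hcF)
                · rcases ih1 hcF hsrc with h | h
                  · exact ih2 hbF (Or.inr (Or.inl h))
                  · exact ih2 hbF (Or.inr (Or.inr h))
            rcases claim f you hconn hyouF (Or.inl hfF) with h | ⟨g, hgF', hgy⟩
            · exact absurd h hyou
            · exact ⟨hyou, g, hgF', hgy⟩

-- ---- B side ----

theorem mem_pvAdjInner (parts : List String) :
    ∀ (keys : List String) (adj : PySem.Dict String (PySem.Set String)) (a b : String),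
      b ∈ (keys.foldl (fun d p => d.insert p (PySem.Set.update (d.getD p PySem.Set.empty) parts)) adj).getD a PySem.Set.empty ↔
        b ∈ adj.getD a PySem.Set.empty ∨ (a ∈ keys ∧ b ∈ parts) := by
  intro keys
  induction keys with
  | nil => simp
  | cons q keys ih =>
    intro adj a b
    rw [List.foldl_cons, ih]
    by_cases hq : a = q
    · subst hq
      rw [PySem.Dict.getD_insert_self]
      rw [PySem.Set.mem_update]
      simp only [List.mem_cons]
      tauto
    · rw [PySem.Dict.getD_insert_of_ne _ _ _ hq]
      simp only [List.mem_cons]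
      tauto

theorem mem_pvAdj :
    ∀ (sh : List String) (adj : PySem.Dict String (PySem.Set String)) (a b : String),
      b ∈ (sh.foldl pvAdjStep adj).getD a PySem.Set.empty ↔
        b ∈ adj.getD a PySem.Set.empty ∨ ∃ p ∈ sh, a ∈ pvSplit p ∧ b ∈ pvSplit p := by
  intro sh
  induction sh with
  | nil => simp
  | cons p sh ih =>
    intro adj a b
    rw [List.foldl_cons, ih]
    have : pvAdjStep adj p =
        (pvSplit p).foldl
          (fun d q => d.insert q (PySem.Set.update (d.getD q PySem.Set.empty) (pvSplit p))) adj := rfl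
    rw [this, mem_pvAdjInner]
    simp only [List.mem_cons]
    constructor
    · rintro ((h | ⟨h1, h2⟩) | ⟨p0, h1, h2, h3⟩)
      · exact Or.inl h
      · exact Or.inr ⟨p, Or.inl rfl, h1, h2⟩
      · exact Or.inr ⟨p0, Or.inr h1, h2, h3⟩
    · rintro (h | ⟨p0, (rfl | h1), h2, h3⟩)
      · exact Or.inl (Or.inl h)
      · exact Or.inl (Or.inr ⟨h2, h3⟩)
      · exact Or.inr ⟨p0, h1, h2, h3⟩

-- membership / shape facts about the pvPush fold
theorem pvPush_fold_mem_fst (ns : List String) :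
    ∀ (seen : PySem.Set String) (st : List String) (z : String),
      z ∈ (ns.foldl pvPush (seen, st)).1 ↔ z ∈ seen ∨ z ∈ ns := by
  induction ns with
  | nil => simp
  | cons nxt ns ih =>
    intro seen st z
    rw [List.foldl_cons]
    by_cases h : PySem.Set.contains seen nxt = true
    · rw [show pvPush (seen, st) nxt = (seen, st) by simp only [pvPush]; rw [if_pos h], ih]
      have : nxt ∈ seen := (PySem.Set.contains_iff _ _).1 h
      simp only [List.mem_cons]
      constructor
      · rintro (h1 | h1)
        · exact Or.inl h1
        · exact Or.inr (Or.inr h1)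
      · rintro (h1 | rfl | h1)
        · exact Or.inl h1
        · exact Or.inl this
        · exact Or.inr h1
    · rw [show pvPush (seen, st) nxt = (PySem.Set.add seen nxt, st ++ [nxt]) by simp only [pvPush]; rw [if_neg h], ih]
      simp only [List.mem_cons, PySem.Set.mem_add]
      tauto
  
theorem pvPush_fold_mem_snd (ns : List String) :
    ∀ (seen : PySem.Set String) (st : List String) (z : String),
      z ∈ (ns.foldl pvPush (seen, st)).2 ↔ z ∈ st ∨ (z ∈ ns ∧ z ∉ seen) := by
  induction ns with
  | nil => simp
  | cons nxt ns ih =>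
    intro seen st z
    rw [List.foldl_cons]
    by_cases h : PySem.Set.contains seen nxt = true
    · rw [show pvPush (seen, st) nxt = (seen, st) by simp only [pvPush]; rw [if_pos h], ih]
      have hmem : nxt ∈ seen := (PySem.Set.contains_iff _ _).1 h
      simp only [List.mem_cons]
      constructor
      · rintro (h1 | ⟨h1, h2⟩)
        · exact Or.inl h1
        · exact Or.inr ⟨Or.inr h1, h2⟩
      · rintro (h1 | ⟨(rfl | h1), h2⟩)
        · exact Or.inl h1
        · exact absurd hmem h2
        · exact Or.inr ⟨h1, h2⟩
    · rw [show pvPush (seen, st) nxt = (PySem.Set.add seen nxt, st ++ [nxt]) by simp only [pvPush]; rw [if_neg h], ih]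
      have hmem : nxt ∉ seen := fun hc => h ((PySem.Set.contains_iff _ _).2 hc)
      simp only [List.mem_cons, List.mem_append, List.not_mem_nil, or_false, PySem.Set.mem_add]
      constructor
      · rintro ((h1 | rfl) | ⟨h1, h2⟩)
        · exact Or.inl h1
        · exact Or.inr ⟨Or.inl rfl, hmem⟩
        · exact Or.inr ⟨Or.inr h1, fun hc => h2 (Or.inl hc)⟩
      · rintro (h1 | ⟨(rfl | h1), h2⟩)
        · exact Or.inl (Or.inl h1)
        · exact Or.inl (Or.inr rfl)
        · by_cases hz : z = nxt
          · exact Or.inl (Or.inr hz)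
          · exact Or.inr ⟨h1, fun hc => hc.elim h2 hz⟩

theorem pvPush_fold_sub_nodup (ns : List String) :
    ∀ (seen : PySem.Set String) (st : List String),
      (∀ x ∈ st, x ∈ seen) → st.Nodup →
      (∀ x ∈ (ns.foldl pvPush (seen, st)).2, x ∈ (ns.foldl pvPush (seen, st)).1) ∧
        (ns.foldl pvPush (seen, st)).2.Nodup := by
  induction ns with
  | nil => intro seen st h1 h2; exact ⟨h1, h2⟩
  | cons nxt ns ih =>
    intro seen st h1 h2
    rw [List.foldl_cons]
    by_cases h : PySem.Set.contains seen nxt = true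
    · rw [show pvPush (seen, st) nxt = (seen, st) by simp only [pvPush]; rw [if_pos h]]; exact ih seen st h1 h2
    · rw [show pvPush (seen, st) nxt = (PySem.Set.add seen nxt, st ++ [nxt]) by simp only [pvPush]; rw [if_neg h]]
      have hns : nxt ∉ seen := fun hc => h ((PySem.Set.contains_iff _ _).2 hc)
      apply ih
      · intro x hx
        rcases List.mem_append.1 hx with hx | hx
        · exact (PySem.Set.mem_add _ _ _).2 (Or.inl (h1 x hx))
        · exact (PySem.Set.mem_add _ _ _).2 (Or.inr (List.mem_singleton.1 hx))
      · refine List.Nodup.append h2 (List.nodup_singleton nxt) ?_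
        intro x hx hx'
        rw [List.mem_singleton] at hx'
        subst hx'
        exact hns (h1 x hx)

theorem pvDiff_add_length (U : List String) (seen : PySem.Set String) (x : String)
    (hU : U.Nodup) (hxU : x ∈ U) (hxs : x ∉ seen) :
    (PySem.Set.diff U (PySem.Set.add seen x)).length + 1 = (PySem.Set.diff U seen).length := by
  have h1 : PySem.Set.diff U (PySem.Set.add seen x) =
      (PySem.Set.diff U seen).filter (fun z => !(z == x)) := by
    show U.filter (fun z => !(PySem.Set.contains (PySem.Set.add seen x) z)) =
      (U.filter (fun z => !(PySem.Set.contains seen z))).filter (fun z => !(z == x))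
    rw [List.filter_filter]
    apply List.filter_congr
    intro z _
    by_cases h1 : z ∈ seen <;> by_cases h2 : z = x <;>
      simp [h1, h2, PySem.Set.mem_add]
  have hnd : (PySem.Set.diff U seen).Nodup := by
    show (U.filter _).Nodup
    exact hU.filter _
  have hxd : x ∈ PySem.Set.diff U seen := (PySem.Set.mem_diff _ _ _).2 ⟨hxU, hxs⟩
  have h2 : (PySem.Set.diff U seen).filter (fun z => !(z == x)) =
      (PySem.Set.diff U seen).erase x := by
    rw [List.Nodup.erase_eq_filter hnd]
    apply List.filter_congr
    intro z _
    simp [bne]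
  rw [h1, h2, List.length_erase_of_mem hxd]
  have : 0 < (PySem.Set.diff U seen).length := List.length_pos_of_mem hxd
  omega

theorem pvPush_fold_measure (ns : List String) (U : List String) (hU : U.Nodup) :
    ∀ (seen : PySem.Set String) (st : List String),
      (∀ z ∈ ns, z ∈ U) →
      (ns.foldl pvPush (seen, st)).2.length +
          2 * (PySem.Set.diff U (ns.foldl pvPush (seen, st)).1).length ≤
        st.length + 2 * (PySem.Set.diff U seen).length := by
  induction ns with
  | nil => intro seen st _; rfl
  | cons nxt ns ih =>
    intro seen st hns
    rw [List.foldl_cons]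
    by_cases h : PySem.Set.contains seen nxt = true
    · rw [show pvPush (seen, st) nxt = (seen, st) by simp only [pvPush]; rw [if_pos h]]
      exact ih seen st (fun z hz => hns z (List.mem_cons_of_mem _ hz))
    · rw [show pvPush (seen, st) nxt = (PySem.Set.add seen nxt, st ++ [nxt]) by simp only [pvPush]; rw [if_neg h]]
      have hmem : nxt ∉ seen := fun hc => h ((PySem.Set.contains_iff _ _).2 hc)
      have := ih (PySem.Set.add seen nxt) (st ++ [nxt])
        (fun z hz => hns z (List.mem_cons_of_mem _ hz))
      have hlen := pvDiff_add_length U seen nxt hU (hns nxt (List.mem_cons_self)) hmem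
      simp only [List.length_append, List.length_singleton] at this
      omega

theorem pvSetAdd_length_le (s : PySem.Set String) (x : String) :
    (PySem.Set.add s x).length ≤ s.length + 1 := by
  unfold PySem.Set.add
  split_ifs <;> simp

theorem pvOfList_length_le :
    ∀ (xs : List String) (acc : PySem.Set String),
      (xs.foldl PySem.Set.add acc).length ≤ acc.length + xs.length := by
  intro xs
  induction xs with
  | nil => simp
  | cons x xs ih =>
    intro acc
    rw [List.foldl_cons]
    have h1 := ih (PySem.Set.add acc x)
    have h2 := pvSetAdd_length_le acc x
    simp only [List.length_cons]
    omega

theorem pvDfs_spec (E : List (List String)) (adj : PySem.Dict String (PySem.Set String))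
    (hadj : ∀ a b : String, b ∈ adj.getD a PySem.Set.empty ↔ ∃ e ∈ E, a ∈ e ∧ b ∈ e) :
    ∀ (fuel : Nat) (seen : PySem.Set String) (stack : List String),
      stack.Nodup → (∀ x ∈ stack, x ∈ seen) →
      (∀ x ∈ seen, x ∈ stack ∨ ∀ y ∈ adj.getD x PySem.Set.empty, y ∈ seen) →
      stack.length + 2 * (PySem.Set.diff (PySem.Set.ofList E.flatten) seen).length < fuel →
      (∀ x ∈ seen, x ∈ pvDfs fuel adj seen stack) ∧
        (∀ x ∈ pvDfs fuel adj seen stack, x ∈ seen ∨ ∃ w ∈ stack, pvConn E w x) ∧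
        (∀ x ∈ pvDfs fuel adj seen stack, ∀ y ∈ adj.getD x PySem.Set.empty,
          y ∈ pvDfs fuel adj seen stack) := by
  intro fuel
  induction fuel with
  | zero => intro seen stack _ _ _ hf; omega
  | succ fuel ih =>
    intro seen stack hnd hss hpr hf
    match stack, hnd, hss, hpr, hf with
    | [], _, _, hpr, _ =>
      refine ⟨fun x hx => hx, fun x hx => Or.inl hx, ?_⟩
      intro x hx y hy
      rcases hpr x hx with h | h
      · exact absurd h (List.not_mem_nil)
      · exact h y hy
    | h0 :: t, hnd, hss, hpr, hf =>
      have hne : h0 :: t ≠ [] := List.cons_ne_nil h0 t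
      set stk := h0 :: t with hstk
      set node := stk.getLast hne with hnode
      set stack' := stk.dropLast with hstack'
      set ns := adj.getD node PySem.Set.empty with hns
      set ss := ns.foldl pvPush (seen, stack') with hssdef
      have hred : pvDfs (fuel + 1) adj seen stk = pvDfs fuel adj ss.1 ss.2 := rfl
      have hsplit : stack' ++ [node] = stk := List.dropLast_append_getLast hne
      have hnode_mem : node ∈ stk := List.getLast_mem hne
      have hnd' : stack'.Nodup := (List.dropLast_sublist stk).nodup hnd
      have hnode_not : node ∉ stack' := by
        intro hc
        have := hsplit ▸ hnd
        rcases List.nodup_append.1 this with ⟨_, _, hdisj⟩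
        exact hdisj node hc node (List.mem_singleton.2 rfl) rfl
      have hmem_stack' : ∀ x, x ∈ stack' ↔ x ∈ stk ∧ x ≠ node := by
        intro x
        constructor
        · intro hx
          refine ⟨by rw [← hsplit]; exact List.mem_append_left _ hx, ?_⟩
          rintro rfl; exact hnode_not hx
        · rintro ⟨hx, hxne⟩
          rw [← hsplit] at hx
          rcases List.mem_append.1 hx with hx | hx
          · exact hx
          · exact absurd (List.mem_singleton.1 hx) hxne
      have hss' : ∀ x ∈ stack', x ∈ seen := fun x hx =>
        hss x ((hmem_stack' x).1 hx).1
      have hfst : ∀ z, z ∈ ss.1 ↔ z ∈ seen ∨ z ∈ ns := pvPush_fold_mem_fst ns seen stack'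
      have hsnd : ∀ z, z ∈ ss.2 ↔ z ∈ stack' ∨ (z ∈ ns ∧ z ∉ seen) := pvPush_fold_mem_snd ns seen stack'
      obtain ⟨hsub2, hnd2⟩ := pvPush_fold_sub_nodup ns seen stack' hss' hnd'
      have hUnodup : (PySem.Set.ofList E.flatten).Nodup := PySem.Set.nodup_ofList _
      have hnsU : ∀ z ∈ ns, z ∈ PySem.Set.ofList E.flatten := by
        intro z hz
        obtain ⟨e, he, _, hze⟩ := (hadj node z).1 hz
        exact (PySem.Set.mem_ofList _ _).2 (List.mem_flatten.2 ⟨e, he, hze⟩)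
      have hmeas := pvPush_fold_measure ns (PySem.Set.ofList E.flatten) hUnodup seen stack' hnsU
      rw [← hssdef] at hmeas
      have hlen' : stack'.length + 1 = stk.length := by
        rw [← hsplit]; simp
      have hf' : ss.2.length + 2 * (PySem.Set.diff (PySem.Set.ofList E.flatten) ss.1).length < fuel := by
        omega
      have hpr' : ∀ x ∈ ss.1, x ∈ ss.2 ∨ ∀ y ∈ adj.getD x PySem.Set.empty, y ∈ ss.1 := by
        intro x hx
        rcases (hfst x).1 hx with hxs | hxn
        · rcases hpr x hxs with hxstk | hclosed
          · by_cases hxnode : x = node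
            · subst hxnode
              right
              intro y hy
              exact (hfst y).2 (Or.inr hy)
            · left
              exact (hsnd x).2 (Or.inl ((hmem_stack' x).2 ⟨hxstk, hxnode⟩))
          · right
            intro y hy
            exact (hfst y).2 (Or.inl (hclosed y hy))
        · by_cases hxs : x ∈ seen
          · rcases hpr x hxs with hxstk | hclosed
            · by_cases hxnode : x = node
              · subst hxnode
                right
                intro y hy
                exact (hfst y).2 (Or.inr hy)
              · left
                exact (hsnd x).2 (Or.inl ((hmem_stack' x).2 ⟨hxstk, hxnode⟩))
            · right
              intro y hy
              exact (hfst y).2 (Or.inl (hclosed y hy))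
          · left
            exact (hsnd x).2 (Or.inr ⟨hxn, hxs⟩)
      obtain ⟨ih1, ih2, ih3⟩ := ih ss.1 ss.2 hnd2 hsub2 hpr' hf'
      rw [hred]
      refine ⟨?_, ?_, ih3⟩
      · intro x hx
        exact ih1 x ((hfst x).2 (Or.inl hx))
      · intro x hx
        rcases ih2 x hx with hx1 | ⟨w, hw, hconn⟩
        · rcases (hfst x).1 hx1 with hxs | hxn
          · exact Or.inl hxs
          · obtain ⟨e, he, hne2, hxe⟩ := (hadj node x).1 hxn
            exact Or.inr ⟨node, hnode_mem, pvConn.edge he hne2 hxe⟩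
        · rcases (hsnd w).1 hw with hw1 | ⟨hwn, _⟩
          · exact Or.inr ⟨w, ((hmem_stack' w).1 hw1).1, hconn⟩
          · obtain ⟨e, he, hne2, hwe⟩ := (hadj node w).1 hwn
            exact Or.inr ⟨node, hnode_mem, pvConn.trans (pvConn.edge he hne2 hwe) hconn⟩

theorem pvAlt_iff (sh : List String) (me you : String) :
    gyahun_dash_solution_alt sh me you = true ↔
      me ≠ you ∧ pvConn (sh.map (fun p => pvSplit p)) me you := by
  by_cases hmy : me = you
  · subst hmy
    simp [gyahun_dash_solution_alt]
  · have hbeq : (me == you) = false := by simpa using hmy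
    set E := sh.map (fun p => pvSplit p) with hE
    set adj := sh.foldl pvAdjStep PySem.Dict.empty with hadjdef
    have hadj : ∀ a b : String, b ∈ adj.getD a PySem.Set.empty ↔ ∃ e ∈ E, a ∈ e ∧ b ∈ e := by
      intro a b
      rw [hadjdef, mem_pvAdj]
      have hempty : b ∈ (PySem.Dict.empty : PySem.Dict String (PySem.Set String)).getD a PySem.Set.empty ↔ False := by
        simp [PySem.Dict.empty, PySem.Dict.getD, PySem.Dict.get?, PySem.Set.empty]
      rw [hE]
      simp only [hempty, false_or, List.mem_map]
      constructor
      · rintro ⟨p, hp, h1, h2⟩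
        exact ⟨pvSplit p, ⟨p, hp, rfl⟩, h1, h2⟩
      · rintro ⟨e, ⟨p, hp, rfl⟩, h1, h2⟩
        exact ⟨p, hp, h1, h2⟩
    set fuel := 2 * E.flatten.length + 2 with hfuel
    have hred : gyahun_dash_solution_alt sh me you =
        PySem.Set.contains (pvDfs fuel adj (PySem.Set.ofList [me]) [me]) you := by
      unfold gyahun_dash_solution_alt
      rw [hbeq]
      rfl
    have hsingle : PySem.Set.ofList [me] = [me] := rfl
    have hbound : ([me] : List String).length +
        2 * (PySem.Set.diff (PySem.Set.ofList E.flatten) (PySem.Set.ofList [me])).length < fuel := by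
      have h1 : (PySem.Set.diff (PySem.Set.ofList E.flatten) (PySem.Set.ofList [me])).length ≤
          (PySem.Set.ofList E.flatten).length := by
        show ((PySem.Set.ofList E.flatten).filter _).length ≤ _
        exact List.length_filter_le _ _
      have h2 : (PySem.Set.ofList E.flatten).length ≤ E.flatten.length := by
        have := pvOfList_length_le E.flatten []
        simpa [PySem.Set.ofList] using this
      simp only [List.length_singleton, hfuel]
      omega
    obtain ⟨hs1, hs2, hs3⟩ := pvDfs_spec E adj hadj fuel (PySem.Set.ofList [me]) [me]
      (List.nodup_singleton me)
      (by intro x hx; rw [hsingle]; exact hx)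
      (by intro x hx; rw [hsingle] at hx; exact Or.inl hx)
      hbound
    set S := pvDfs fuel adj (PySem.Set.ofList [me]) [me] with hS
    have hreach : ∀ a b : String, pvConn E a b → a ∈ S → b ∈ S := by
      intro a b hab
      induction hab with
      | @edge e a b he ha hb =>
        intro haS
        exact hs3 a haS b ((hadj a b).2 ⟨e, he, ha, hb⟩)
      | @trans a c b h1 h2 ih1 ih2 =>
        intro haS
        exact ih2 (ih1 haS)
    rw [hred]
    constructor
    · intro hc
      have hyS : you ∈ S := (PySem.Set.contains_iff _ _).1 hc
      rcases hs2 you hyS with hys | ⟨w, hw, hconn⟩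
      · rw [hsingle] at hys
        exact absurd (List.mem_singleton.1 hys).symm hmy
      · rw [List.mem_singleton] at hw
        subst hw
        exact ⟨hmy, hconn⟩
    · rintro ⟨_, hconn⟩
      have hmS : me ∈ S := hs1 me (by rw [hsingle]; exact List.mem_singleton.2 rfl)
      exact (PySem.Set.contains_iff _ _).2 (hreach me you hconn hmS)

theorem pvA_iff (sh : List String) (me you : String) :
    gyahun_dash_solution sh me you = true ↔
      you ≠ me ∧ pvConn (sh.map (fun p => pvSplit p)) me you := by
  have hsingle : PySem.Set.ofList [me] = [me] := rfl
  have hmain := pvLoopA_iff (((PySem.Set.ofList (sh.map (fun pair => pvSplit pair))).length) + 1)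
      (PySem.Set.ofList (sh.map (fun pair => pvSplit pair))) [me] you (by omega)
  have hiff : gyahun_dash_solution sh me you = true ↔
      you ∉ [me] ∧ ∃ f ∈ [me], pvConn (PySem.Set.ofList (sh.map (fun pair => pvSplit pair))) f you := by
    rw [← hmain]; unfold gyahun_dash_solution; rw [hsingle]
  rw [hiff]
  have hconn_iff : pvConn (PySem.Set.ofList (sh.map (fun pair => pvSplit pair))) me you ↔
      pvConn (sh.map (fun pair => pvSplit pair)) me you := by
    constructor
    · exact pvConn_mono (fun e he => (PySem.Set.mem_ofList _ _).1 he)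
    · exact pvConn_mono (fun e he => (PySem.Set.mem_ofList _ _).2 he)
  simp only [List.mem_singleton]
  constructor
  · rintro ⟨h1, f, rfl, h2⟩
    exact ⟨h1, hconn_iff.1 h2⟩
  · rintro ⟨h1, h2⟩
    exact ⟨h1, me, rfl, hconn_iff.2 h2⟩

-- ===== VERDICT (by name: the statement is the Claim_ definition above) =====
theorem gyahun_dash_solution_spec : Claim_equal_gyahun_dash_solution := by
  intro sh me you _
  unfold Spec_gyahun_dash_solution
  rw [Bool.eq_iff_iff, pvA_iff, pvAlt_iff]
  constructor
  · rintro ⟨h1, h2⟩; exact ⟨h1.symm, h2⟩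
  · rintro ⟨h1, h2⟩; exact ⟨h1.symm, h2⟩
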